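-- pv_equiv track=rewrite | github.com/MyElephantLover/Python | Check_If_N_and_Double_Exist.py | checkExist
-- ===== SOURCE A (Python) =====
-- from typing import List
--
-- def checkExist(arr: List[int]) -> bool:
--     # Brute Force approach is to iterate over the array with separate index
--     # initialize variables
--     n = len(arr)
--
--     for i in range(0, n):
--         for j in range(0, n):
--             if i == j:
--                 continue
--             if arr[i] == 2 * arr[j]:
--                 return True
--     return False # if none of the above return happened, return False
-- ===== SOURCE B (Python) =====
-- from typing import List
--
-- def checkExist(arr: List[int]) -> bool:
--     # One pass with a set of previously seen values: x pairs with an earlier y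
--     # iff 2*x was seen, or x is even and x//2 was seen.
--     seen = set()
--     for x in arr:
--         if 2 * x in seen or (x % 2 == 0 and x // 2 in seen):
--             return True
--         seen.add(x)
--     return False
-- ===== Notes on version B (the rewrite author's own statement) =====
-- stated objective: faster
-- what changed: Replaced the O(n^2) all-pairs index scan by a single pass that keeps a hash set of previously seen values and checks 2*x and x//2 (when x is even) against it.
import Mathlib
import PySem

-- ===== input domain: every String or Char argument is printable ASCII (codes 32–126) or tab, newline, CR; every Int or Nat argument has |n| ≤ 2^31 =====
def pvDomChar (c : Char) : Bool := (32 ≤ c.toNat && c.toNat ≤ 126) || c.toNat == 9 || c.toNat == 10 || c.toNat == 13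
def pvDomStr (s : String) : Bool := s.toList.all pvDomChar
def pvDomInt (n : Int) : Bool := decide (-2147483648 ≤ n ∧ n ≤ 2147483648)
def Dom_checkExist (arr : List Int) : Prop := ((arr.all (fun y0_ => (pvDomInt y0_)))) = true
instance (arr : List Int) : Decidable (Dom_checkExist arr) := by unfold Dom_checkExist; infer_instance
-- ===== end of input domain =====

-- B is a one-pass hash-set re-implementation of A's O(n^2) all-pairs scan (return values proved equal).

-- ===== PORT A =====
-- nested 'for i in range(0,n): for j in range(0,n)' with early return → nested any over pyRange
def checkExist (arr : List Int) : Bool :=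
  let n : Int := arr.length
  (PySem.List.pyRange 0 n 1).any (fun i =>
    (PySem.List.pyRange 0 n 1).any (fun j =>
      if i = j then false
      else decide (PySem.List.pyGetD arr i 0 = 2 * PySem.List.pyGetD arr j 0)))

-- ===== PORT B =====
-- 'for x in arr: … return True … seen.add(x)' with early return → structural recursion carrying the set
def checkExistLoop (seen : PySem.Set Int) : List Int → Bool
  | [] => false
  | x :: rest =>
    if PySem.Set.contains seen (2 * x)
        || (decide (PySem.Int.mod x 2 = 0) && PySem.Set.contains seen (PySem.Int.floordiv x 2)) then
      true
    else
      checkExistLoop (PySem.Set.add seen x) rest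

def checkExist_alt (arr : List Int) : Bool :=
  checkExistLoop PySem.Set.empty arr

-- ===== PRECONDITION & SPEC =====
def Spec_checkExist (arr : List Int) (out : Bool) : Prop := out = checkExist_alt arr
instance (arr : List Int) (out : Bool) : Decidable (Spec_checkExist arr out) := by unfold Spec_checkExist; infer_instance

-- ===== CLAIM (what is proved, stated in full; the proofs are below) =====
def Claim_equal_checkExist : Prop := ∀ (arr : List Int), Dom_checkExist arr → Spec_checkExist arr (checkExist arr)

-- ===== LEMMAS AND PROOFS =====

-- symmetric "one is double of the other"
def pvRel (a b : Int) : Prop := a = 2 * b ∨ b = 2 * a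

-- index formulation (what A computes)
def pvPair (l : List Int) : Prop :=
  ∃ i j : Nat, i < l.length ∧ j < l.length ∧ i ≠ j ∧ l.getD i 0 = 2 * l.getD j 0

-- split formulation (what B computes)
def pvSplit (l : List Int) : Prop :=
  ∃ u x v, l = u ++ x :: v ∧ ∃ y ∈ u, pvRel y x


theorem pvA_iff (arr : List Int) : checkExist arr = true ↔ pvPair arr := by
  unfold checkExist pvPair
  simp only [List.any_eq_true, PySem.List.mem_pyRange_one]
  constructor
  · rintro ⟨i, ⟨hi0, hin⟩, j, ⟨hj0, hjn⟩, hb⟩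
    by_cases hij : i = j
    · simp [hij] at hb
    · simp only [if_neg hij, decide_eq_true_eq] at hb
      refine ⟨i.toNat, j.toNat, by omega, by omega, by omega, ?_⟩
      rw [List.getD_eq_getElem _ _ (by omega), List.getD_eq_getElem _ _ (by omega)]
      rwa [PySem.List.pyGetD_eq_getElem arr 0 hi0 hin, PySem.List.pyGetD_eq_getElem arr 0 hj0 hjn] at hb
  · rintro ⟨i, j, hi, hj, hij, h⟩
    refine ⟨(i : Int), ⟨by omega, by exact_mod_cast hi⟩, (j : Int), ⟨by omega, by exact_mod_cast hj⟩, ?_⟩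
    rw [if_neg (by exact_mod_cast hij)]
    simp only [PySem.List.pyGetD_natCast, decide_eq_true_eq]
    exact h

theorem pvCond_iff (s : PySem.Set Int) (x : Int) :
    (PySem.Set.contains s (2 * x)
      || (decide (PySem.Int.mod x 2 = 0) && PySem.Set.contains s (PySem.Int.floordiv x 2))) = true
    ↔ ∃ y ∈ s, pvRel y x := by
  simp only [Bool.or_eq_true, Bool.and_eq_true, decide_eq_true_eq, PySem.Set.contains_iff,
    PySem.Int.mod_eq_zero_iff_dvd, pvRel]
  constructor
  · rintro (h | ⟨⟨k, hk⟩, h2⟩)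
    · exact ⟨2 * x, h, Or.inl rfl⟩
    · refine ⟨PySem.Int.floordiv x 2, h2, Or.inr ?_⟩
      rw [PySem.Int.floordiv_eq_ediv_of_pos (by norm_num)]
      omega
  · rintro ⟨y, hy, h | h⟩
    · exact Or.inl (h ▸ hy)
    · refine Or.inr ⟨⟨y, h⟩, ?_⟩
      have : PySem.Int.floordiv x 2 = y := by
        rw [PySem.Int.floordiv_eq_ediv_of_pos (by norm_num)]
        omega
      rwa [this]

theorem pvLoop_iff (l : List Int) : ∀ s : PySem.Set Int,
    checkExistLoop s l = true ↔
      ∃ u x v, l = u ++ x :: v ∧ ∃ y, (y ∈ s ∨ y ∈ u) ∧ pvRel y x := by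
  induction l with
  | nil =>
    intro s
    simp [checkExistLoop]
  | cons x r ih =>
    intro s
    rw [checkExistLoop]
    by_cases hc : (PySem.Set.contains s (2 * x)
        || (decide (PySem.Int.mod x 2 = 0) && PySem.Set.contains s (PySem.Int.floordiv x 2))) = true
    · rw [if_pos hc]
      obtain ⟨y, hy, hrel⟩ := (pvCond_iff s x).mp hc
      simp only [true_iff]
      exact ⟨[], x, r, rfl, y, Or.inl hy, hrel⟩
    · rw [if_neg hc, ih (PySem.Set.add s x)]
      constructor
      · rintro ⟨u, x', v, rfl, y, hy, hrel⟩
        refine ⟨x :: u, x', v, rfl, y, ?_, hrel⟩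
        rcases hy with hy | hy
        · rcases (PySem.Set.mem_add _ _ _).mp hy with h | h
          · exact Or.inl h
          · exact Or.inr (by simp [h])
        · exact Or.inr (List.mem_cons_of_mem _ hy)
      · rintro ⟨u, x', v, heq, y, hy, hrel⟩
        cases u with
        | nil =>
          simp only [List.nil_append, List.cons.injEq] at heq
          obtain ⟨rfl, rfl⟩ := heq
          rcases hy with hy | hy
          · exact absurd ((pvCond_iff s _).mpr ⟨y, hy, hrel⟩) hc
          · simp at hy
        | cons u0 u' =>
          simp only [List.cons_append, List.cons.injEq] at heq
          obtain ⟨rfl, rfl⟩ := heq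
          refine ⟨u', x', v, rfl, y, ?_, hrel⟩
          rcases hy with hy | hy
          · exact Or.inl ((PySem.Set.mem_add _ _ _).mpr (Or.inl hy))
          · rcases List.mem_cons.mp hy with h | h
            · exact Or.inl ((PySem.Set.mem_add _ _ _).mpr (Or.inr h))
            · exact Or.inr h

theorem pvB_iff (arr : List Int) : checkExist_alt arr = true ↔ pvSplit arr := by
  unfold checkExist_alt pvSplit
  rw [pvLoop_iff arr PySem.Set.empty]
  constructor
  · rintro ⟨u, x, v, rfl, y, hy, hrel⟩
    refine ⟨u, x, v, rfl, y, ?_, hrel⟩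
    rcases hy with hy | hy
    · simp [PySem.Set.empty] at hy
    · exact hy
  · rintro ⟨u, x, v, rfl, y, hy, hrel⟩
    exact ⟨u, x, v, rfl, y, Or.inr hy, hrel⟩

theorem pvPair_iff_split (l : List Int) : pvPair l ↔ pvSplit l := by
  unfold pvPair pvSplit
  constructor
  · rintro ⟨i, j, hi, hj, hij, h⟩
    rw [List.getD_eq_getElem _ _ hi, List.getD_eq_getElem _ _ hj] at h
    rcases Nat.lt_or_gt_of_ne hij with hlt | hgt
    · refine ⟨l.take j, l[j], l.drop (j + 1), ?_, l[i], ?_, Or.inl h⟩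
      · conv_lhs => rw [← List.take_append_drop j l, List.drop_eq_getElem_cons hj]
      · have : (l.take j)[i]'(by simp; omega) = l[i] := List.getElem_take
        exact this ▸ List.getElem_mem _
    · refine ⟨l.take i, l[i], l.drop (i + 1), ?_, l[j], ?_, Or.inr h⟩
      · conv_lhs => rw [← List.take_append_drop i l, List.drop_eq_getElem_cons hi]
      · have : (l.take i)[j]'(by simp; omega) = l[j] := List.getElem_take
        exact this ▸ List.getElem_mem _
  · rintro ⟨u, x, v, rfl, y, hy, hrel⟩
    obtain ⟨i, hi, rfl⟩ := List.mem_iff_getElem.mp hy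
    have hlen : (u ++ x :: v).length = u.length + v.length + 1 := by simp; omega
    have hgu : (u ++ x :: v).getD i 0 = u[i] := by
      rw [List.getD_eq_getElem _ _ (by simp; omega)]
      exact List.getElem_append_left hi
    have hgx : (u ++ x :: v).getD u.length 0 = x := by
      rw [List.getD_eq_getElem _ _ (by simp)]
      simp
    rcases hrel with h | h
    · exact ⟨i, u.length, by omega, by omega, by omega, by rw [hgu, hgx, h]⟩
    · exact ⟨u.length, i, by omega, by omega, by omega, by rw [hgu, hgx, h]⟩

-- ===== VERDICT (by name: the statement is the Claim_ definition above) =====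
theorem checkExist_spec : Claim_equal_checkExist := by
  intro arr _
  unfold Spec_checkExist
  have := (pvA_iff arr).trans ((pvPair_iff_split arr).trans (pvB_iff arr).symm)
  exact Bool.coe_iff_coe.mp this
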